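-- pv_equiv track=rewrite | github.com/palmibb/py | reto5.py | cambio_socios
-- ===== SOURCE A (Python) =====
-- def cambio_socios(x, y):
--     listax1=[]
--     listax2=[]
--     for i in x:
--         if i not in y:
--             listax1.append(i)
--     for i in y:
--         if i not in x:
--             listax2.append(i)
--     if len(listax1)<len(listax2):
--         return(len(listax1))
--     else:
--         return(len(listax2))
-- ===== SOURCE B (Python) =====
-- def cambio_socios(x, y):
--     xs = sorted(x)
--     ys = sorted(y)
--     i = j = c1 = c2 = 0
--     n, m = len(xs), len(ys)
--     while i < n and j < m:
--         a, b = xs[i], ys[j]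
--         if a < b:
--             c1 += 1
--             i += 1
--         elif b < a:
--             c2 += 1
--             j += 1
--         else:
--             while i < n and xs[i] == a:
--                 i += 1
--             while j < m and ys[j] == a:
--                 j += 1
--     c1 += n - i
--     c2 += m - j
--     return c1 if c1 < c2 else c2
-- ===== Notes on version B (the rewrite author's own statement) =====
-- stated objective: faster
-- what changed: Sorts both lists and counts each side's exclusive elements in a single two-pointer merge scan (skipping runs of equal values), instead of building two lists with quadratic in-list membership tests.
import Mathlib
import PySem

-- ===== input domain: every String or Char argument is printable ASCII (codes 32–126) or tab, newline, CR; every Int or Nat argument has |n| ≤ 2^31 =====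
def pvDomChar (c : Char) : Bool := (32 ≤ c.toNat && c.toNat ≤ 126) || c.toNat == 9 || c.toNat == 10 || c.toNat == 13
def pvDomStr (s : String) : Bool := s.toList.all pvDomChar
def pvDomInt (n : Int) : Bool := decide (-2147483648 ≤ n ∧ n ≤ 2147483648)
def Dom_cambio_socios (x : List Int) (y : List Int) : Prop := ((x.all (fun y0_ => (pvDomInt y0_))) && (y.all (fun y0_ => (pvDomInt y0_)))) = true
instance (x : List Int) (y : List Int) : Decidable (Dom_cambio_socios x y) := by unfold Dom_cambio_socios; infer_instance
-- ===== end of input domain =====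

-- B sorts both lists and counts exclusive elements with one two-pointer merge scan (measurably faster).


-- ===== PORT A =====
def cambio_socios (x : List Int) (y : List Int) : Int :=
  let listax1 := x.foldl (fun acc i => if !(y.contains i) then acc ++ [i] else acc) []
  let listax2 := y.foldl (fun acc i => if !(x.contains i) then acc ++ [i] else acc) []
  if (listax1.length : Int) < (listax2.length : Int) then (listax1.length : Int)
  else (listax2.length : Int)

-- ===== PORT B =====
-- two-pointer merge over the two sorted lists; on a tie both runs of the
-- common value are skipped (Source B's inner while loops = dropWhile)
def csGo : List Int → List Int → Int × Int
  | [], ys => (0, (ys.length : Int))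
  | a :: as, [] => (((a :: as).length : Int), 0)
  | a :: as, b :: bs =>
    if a < b then
      let p := csGo as (b :: bs); (p.1 + 1, p.2)
    else if b < a then
      let p := csGo (a :: as) bs; (p.1, p.2 + 1)
    else
      csGo (as.dropWhile (· == a)) (bs.dropWhile (· == a))
termination_by xs ys => xs.length + ys.length
decreasing_by
  · simp
  · simp
  · have h1 := List.length_dropWhile_le (· == a) as
    have h2 := List.length_dropWhile_le (· == a) bs
    simp only [List.length_cons]; omega

def cambio_socios_alt (x : List Int) (y : List Int) : Int :=
  let xs := PySem.List.sorted x (fun i => i) false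
  let ys := PySem.List.sorted y (fun i => i) false
  let p := csGo xs ys
  if p.1 < p.2 then p.1 else p.2

-- ===== PRECONDITION & SPEC =====
def Spec_cambio_socios (x : List Int) (y : List Int) (out : Int) : Prop := out = cambio_socios_alt x y
instance (x : List Int) (y : List Int) (out : Int) : Decidable (Spec_cambio_socios x y out) := by unfold Spec_cambio_socios; infer_instance

-- ===== CLAIM (what is proved, stated in full; the proofs are below) =====
def Claim_equal_cambio_socios : Prop := ∀ (x : List Int) (y : List Int), Dom_cambio_socios x y → Spec_cambio_socios x y (cambio_socios x y)

-- ===== LEMMAS AND PROOFS =====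

theorem pv_dropWhile_gt (a : Int) (l : List Int) (h : l.Pairwise (· ≤ ·))
    (hall : ∀ i ∈ l, a ≤ i) : ∀ i ∈ l.dropWhile (· == a), a < i := by
  induction l with
  | nil => simp
  | cons c cs ih =>
    by_cases hc : c = a
    · subst hc
      rw [List.dropWhile_cons_of_pos (by simp)]
      exact ih (List.pairwise_cons.mp h).2 (fun i hi => hall i (List.mem_cons_of_mem _ hi))
    · rw [List.dropWhile_cons_of_neg (by simp [hc])]
      intro i hi
      rcases List.mem_cons.mp hi with rfl | hi
      · exact lt_of_le_of_ne (hall _ (List.mem_cons_self)) (Ne.symm hc)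
      · exact lt_of_lt_of_le
          (lt_of_le_of_ne (hall _ List.mem_cons_self) (Ne.symm hc))
          ((List.pairwise_cons.mp h).1 i hi)

-- dropping the common run of value a from both sides preserves the exclusive count
theorem pv_countP_drop (a : Int) (xs ys : List Int) (hxs : xs.Pairwise (· ≤ ·))
    (hxa : ∀ i ∈ xs, a ≤ i) (hay : a ∈ ys) :
    xs.countP (fun i => !(ys.contains i))
      = (xs.dropWhile (· == a)).countP (fun i => !((ys.dropWhile (· == a)).contains i)) := by
  have hgt := pv_dropWhile_gt a xs hxs hxa
  conv_lhs => rw [← List.takeWhile_append_dropWhile (p := (· == a)) (l := xs)]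
  rw [List.countP_append]
  have h1 : (xs.takeWhile (· == a)).countP (fun i => !(ys.contains i)) = 0 := by
    rw [List.countP_eq_zero]
    intro i hi
    have hia : i = a := by simpa using List.mem_takeWhile_imp hi
    rw [hia]
    simp [List.contains_eq_mem, hay]
  rw [h1, Nat.zero_add]
  apply List.countP_congr
  intro i hi
  have hia : a < i := hgt i hi
  have hmem : (i ∈ ys) ↔ (i ∈ ys.dropWhile (· == a)) := by
    conv_lhs => rw [← List.takeWhile_append_dropWhile (p := (· == a)) (l := ys)]
    simp only [List.mem_append]
    constructor
    · rintro (h | h)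
      · have : i = a := by simpa using List.mem_takeWhile_imp h
        omega
      · exact h
    · exact Or.inr
  simp [List.contains_eq_mem, hmem]

theorem pv_csGo_eq (xs ys : List Int) (hx : xs.Pairwise (· ≤ ·)) (hy : ys.Pairwise (· ≤ ·)) :
    csGo xs ys = ((xs.countP (fun i => !(ys.contains i)) : Int),
                  (ys.countP (fun j => !(xs.contains j)) : Int)) := by
  induction xs, ys using csGo.induct with
  | case1 ys =>
    simp [csGo]
  | case2 a as =>
    simp [csGo]
  | case3 a as b bs hab ih =>
    have has : as.Pairwise (· ≤ ·) := (List.pairwise_cons.mp hx).2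
    have hbge : ∀ j ∈ b :: bs, b ≤ j := by
      intro j hj
      rcases List.mem_cons.mp hj with rfl | hj
      · exact le_refl _
      · exact (List.pairwise_cons.mp hy).1 j hj
    rw [csGo, if_pos hab, ih has hy]
    have hna : a ∉ b :: bs := by
      intro hmem
      exact absurd (hbge a hmem) (by omega)
    have hc : List.countP (fun j => !((a :: as).contains j)) (b :: bs)
        = List.countP (fun j => !(as.contains j)) (b :: bs) := by
      apply List.countP_congr
      intro j hj
      have hja : j ≠ a := by have := hbge j hj; omega
      simp [List.contains_eq_mem, hja]
    simp only [Prod.mk.injEq]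
    refine ⟨?_, ?_⟩
    · simp only [List.countP_cons, List.contains_eq_mem, List.mem_cons] at *
      have h1 : ¬ (a = b ∨ a ∈ bs) := hna
      simp [h1]
    · rw [hc]
  | case4 a as b bs hab hba ih =>
    have hbs : bs.Pairwise (· ≤ ·) := (List.pairwise_cons.mp hy).2
    have hage : ∀ i ∈ a :: as, a ≤ i := by
      intro i hi
      rcases List.mem_cons.mp hi with rfl | hi
      · exact le_refl _
      · exact (List.pairwise_cons.mp hx).1 i hi
    rw [csGo, if_neg hab, if_pos hba, ih hx hbs]
    have hnb : b ∉ a :: as := by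
      intro hmem
      exact absurd (hage b hmem) (by omega)
    have hc : List.countP (fun i => !((b :: bs).contains i)) (a :: as)
        = List.countP (fun i => !(bs.contains i)) (a :: as) := by
      apply List.countP_congr
      intro i hi
      have hib : i ≠ b := by have := hage i hi; omega
      simp [List.contains_eq_mem, hib]
    simp only [Prod.mk.injEq]
    refine ⟨?_, ?_⟩
    · rw [hc]
    · simp only [List.countP_cons, List.contains_eq_mem, List.mem_cons] at *
      have h1 : ¬ (b = a ∨ b ∈ as) := hnb
      simp [h1]
  | case5 a as b bs hab hba ih =>
    have hba' : b = a := by omega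
    rw [hba'] at hy ⊢
    have has : as.Pairwise (· ≤ ·) := (List.pairwise_cons.mp hx).2
    have hbs : bs.Pairwise (· ≤ ·) := (List.pairwise_cons.mp hy).2
    have hx' : (as.dropWhile (· == a)).Pairwise (· ≤ ·) :=
      has.sublist (List.dropWhile_sublist _)
    have hy' : (bs.dropWhile (· == a)).Pairwise (· ≤ ·) :=
      hbs.sublist (List.dropWhile_sublist _)
    rw [csGo, if_neg (show ¬ a < a by omega), if_neg (show ¬ a < a by omega), ih hx' hy']
    have hcons_x : (a :: as).dropWhile (· == a) = as.dropWhile (· == a) :=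
      List.dropWhile_cons_of_pos (by simp)
    have hcons_y : (a :: bs).dropWhile (· == a) = bs.dropWhile (· == a) :=
      List.dropWhile_cons_of_pos (by simp)
    have hage : ∀ i ∈ a :: as, a ≤ i := by
      intro i hi
      rcases List.mem_cons.mp hi with rfl | hi
      · exact le_refl _
      · exact (List.pairwise_cons.mp hx).1 i hi
    have hbge : ∀ j ∈ a :: bs, a ≤ j := by
      intro j hj
      rcases List.mem_cons.mp hj with rfl | hj
      · exact le_refl _
      · exact (List.pairwise_cons.mp hy).1 j hj
    have e1 : (a :: as).countP (fun i => !((a :: bs).contains i))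
        = (as.dropWhile (· == a)).countP (fun i => !((bs.dropWhile (· == a)).contains i)) := by
      rw [pv_countP_drop a (a :: as) (a :: bs) hx hage (List.mem_cons_self), hcons_x, hcons_y]
    have e2 : (a :: bs).countP (fun j => !((a :: as).contains j))
        = (bs.dropWhile (· == a)).countP (fun j => !((as.dropWhile (· == a)).contains j)) := by
      rw [pv_countP_drop a (a :: bs) (a :: as) hy hbge (List.mem_cons_self), hcons_x, hcons_y]
    rw [e1, e2]

-- ===== VERDICT (by name: the statement is the Claim_ definition above) =====
theorem cambio_socios_spec : Claim_equal_cambio_socios := by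
  intro x y _
  unfold Spec_cambio_socios cambio_socios cambio_socios_alt
  dsimp only
  have hx : (PySem.List.sorted x (fun i => i) false).Pairwise (· ≤ ·) := by
    simpa using PySem.List.sorted_pairwise x (fun i => i)
  have hy : (PySem.List.sorted y (fun i => i) false).Pairwise (· ≤ ·) := by
    simpa using PySem.List.sorted_pairwise y (fun i => i)
  rw [pv_csGo_eq _ _ hx hy]
  have hcy : (fun i : Int => !((PySem.List.sorted y (fun i => i) false).contains i))
      = (fun i => !(y.contains i)) := by
    funext i
    simp [List.contains_eq_mem, PySem.List.mem_sorted]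
  have hcx : (fun j : Int => !((PySem.List.sorted x (fun i => i) false).contains j))
      = (fun j => !(x.contains j)) := by
    funext j
    simp [List.contains_eq_mem, PySem.List.mem_sorted]
  rw [hcy, hcx,
      (PySem.List.sorted_perm x (fun i => i) false).countP_eq (fun i => !(y.contains i)),
      (PySem.List.sorted_perm y (fun i => i) false).countP_eq (fun j => !(x.contains j))]
  simp only [PySem.List.foldl_append_if_eq_filter, List.nil_append,
      ← List.countP_eq_length_filter]
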